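-- pv_equiv track=rewrite | github.com/rollend/Data-Merging | draft/DataMergeTest(Draft).py | variableCheck
-- ===== SOURCE A (Python) =====
-- def variableCheck(d1, d2):
--     shared_items = set(d1.items()) & set(d2 .items())
--     country_check = False
--     title_check = False
--     city_check = False
--     for e in shared_items:
--         if 'country' in e:
--             country_check = True
--         if 'title' in e:
--             title_check = True
--         if 'city' in e:
--             city_check = True
--     if (country_check and title_check and city_check):
--         return True
--     else:
--         return False
-- ===== SOURCE B (Python) =====
-- def variableCheck(d1, d2):
--     items2 = d2.items()
--
--     def shared_pair_mentions(word):
--         return any((k == word or v == word) and (k, v) in items2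
--                    for k, v in d1.items())
--
--     return all(shared_pair_mentions(w) for w in ('country', 'title', 'city'))
-- ===== Notes on version B (the rewrite author's own statement) =====
-- stated objective: simpler
-- what changed: Never materialises the shared-items intersection set or any boolean flags: for each of the three target words it does an independent existential scan of d1 for a pair that mentions the word and is also an item of d2, conjoined with all().
import Mathlib
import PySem

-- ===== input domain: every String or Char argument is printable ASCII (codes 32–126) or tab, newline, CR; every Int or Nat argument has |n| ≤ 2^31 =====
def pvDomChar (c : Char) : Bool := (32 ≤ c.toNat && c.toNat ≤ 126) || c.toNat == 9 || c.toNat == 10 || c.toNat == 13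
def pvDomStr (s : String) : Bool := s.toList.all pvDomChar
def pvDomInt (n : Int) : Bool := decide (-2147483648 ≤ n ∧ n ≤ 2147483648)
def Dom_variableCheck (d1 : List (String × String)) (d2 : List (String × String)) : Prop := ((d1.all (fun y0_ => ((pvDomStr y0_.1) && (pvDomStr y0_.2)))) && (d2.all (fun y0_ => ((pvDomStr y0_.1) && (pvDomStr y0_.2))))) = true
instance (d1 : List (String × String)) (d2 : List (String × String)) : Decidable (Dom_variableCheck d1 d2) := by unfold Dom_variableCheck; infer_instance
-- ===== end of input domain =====

-- B drops the intersection set and the three boolean flags: for each target word it does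
-- an independent existential scan of d1 for a pair mentioning the word that is also an
-- item of d2, conjoined with all() (simpler decomposition).


-- ===== PORT A =====
-- shared_items iterated with three independent flags; the result is order-independent,
-- so folding over the Set's element list is exact.
def variableCheck (d1 : List (String × String)) (d2 : List (String × String)) : Bool :=
  let shared := PySem.Set.inter (PySem.Set.ofList d1) (PySem.Set.ofList d2)
  let st := shared.foldl (fun (acc : Bool × Bool × Bool) e =>
    let acc := if e.1 == "country" || e.2 == "country" then (true, acc.2.1, acc.2.2) else acc
    let acc := if e.1 == "title" || e.2 == "title" then (acc.1, true, acc.2.2) else acc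
    if e.1 == "city" || e.2 == "city" then (acc.1, acc.2.1, true) else acc)
    (false, false, false)
  if st.1 && st.2.1 && st.2.2 then true else false

-- ===== PORT B =====
def variableCheck_alt (d1 : List (String × String)) (d2 : List (String × String)) : Bool :=
  ["country", "title", "city"].all (fun w =>
    d1.any (fun p => (p.1 == w || p.2 == w) && d2.contains p))

-- ===== PRECONDITION & SPEC =====
def Spec_variableCheck (d1 : List (String × String)) (d2 : List (String × String)) (out : Bool) : Prop := out = variableCheck_alt d1 d2
instance (d1 : List (String × String)) (d2 : List (String × String)) (out : Bool) : Decidable (Spec_variableCheck d1 d2 out) := by unfold Spec_variableCheck; infer_instance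

-- ===== CLAIM (what is proved, stated in full; the proofs are below) =====
def Claim_equal_variableCheck : Prop := ∀ (d1 : List (String × String)) (d2 : List (String × String)), Dom_variableCheck d1 d2 → Spec_variableCheck d1 d2 (variableCheck d1 d2)

-- ===== LEMMAS AND PROOFS =====

-- A's flag fold computes, in each component, "initial flag OR some shared pair mentions the word".
theorem flagFold (l : List (String × String)) (c t ci : Bool) :
    l.foldl (fun (acc : Bool × Bool × Bool) e =>
      let acc := if e.1 == "country" || e.2 == "country" then (true, acc.2.1, acc.2.2) else acc
      let acc := if e.1 == "title" || e.2 == "title" then (acc.1, true, acc.2.2) else acc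
      if e.1 == "city" || e.2 == "city" then (acc.1, acc.2.1, true) else acc)
      (c, t, ci)
    = (c || l.any (fun e => e.1 == "country" || e.2 == "country"),
       t || l.any (fun e => e.1 == "title" || e.2 == "title"),
       ci || l.any (fun e => e.1 == "city" || e.2 == "city")) := by
  induction l generalizing c t ci with
  | nil => simp
  | cons e l ih =>
    simp only [List.foldl_cons, List.any_cons]
    by_cases hc : (e.1 == "country" || e.2 == "country") = true <;>
      by_cases ht : (e.1 == "title" || e.2 == "title") = true <;>
        by_cases hy : (e.1 == "city" || e.2 == "city") = true <;>
          simp only [hc, ht, hy, if_true, ih,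
            Bool.false_or, Bool.true_or, Bool.or_true] <;>
          simp_all

-- "∃ shared pair with property f" = "∃ pair of d1 with f that is also in d2".
theorem sharedAny (d1 d2 : List (String × String)) (f : String × String → Bool) :
    (PySem.Set.inter (PySem.Set.ofList d1) (PySem.Set.ofList d2)).any f
      = d1.any (fun p => f p && d2.contains p) := by
  rw [← Bool.coe_iff_coe]
  simp only [List.any_eq_true, Bool.and_eq_true, List.contains_iff_mem]
  constructor
  · rintro ⟨p, hp, hf⟩
    have := (PySem.Set.mem_inter _ _ _).1 hp
    exact ⟨p, (PySem.Set.mem_ofList _ _).1 this.1, hf, (PySem.Set.mem_ofList _ _).1 this.2⟩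
  · rintro ⟨p, h1, hf, h2⟩
    exact ⟨p, (PySem.Set.mem_inter _ _ _).2 ⟨(PySem.Set.mem_ofList _ _).2 h1, (PySem.Set.mem_ofList _ _).2 h2⟩, hf⟩

-- ===== VERDICT (by name: the statement is the Claim_ definition above) =====
theorem variableCheck_spec : Claim_equal_variableCheck := by
  intro d1 d2 _
  show variableCheck d1 d2 = variableCheck_alt d1 d2
  unfold variableCheck variableCheck_alt
  simp only [flagFold, Bool.false_or, List.all_cons, List.all_nil, Bool.and_true,
    ← sharedAny]
  split_ifs with h
  · rw [Bool.and_assoc] at h; exact h.symm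
  · rw [Bool.and_assoc] at h; simp only [Bool.not_eq_true] at h; exact h.symm
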